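-- pv_equiv track=rewrite | github.com/vlmsgnkag/md5 | app.py | custom_matrix_mix_hash
-- ===== SOURCE A (Python) =====
-- def custom_matrix_mix_hash(s):
--     """
--     Sử dụng phép nhân ma trận 2x2 cho từng block của chuỗi:
--     - Chia chuỗi thành block 4 ký tự, pad nếu cần.
--     - Mỗi block chuyển thành vector và nhân với ma trận cố định.
--     """
--     M = [[3, 5], [7, 11]]  # Ma trận 2x2 với số nguyên tố nhỏ
--     h = 0
--     for i in range(0, len(s), 4):
--         block = s[i:i+4]
--         if len(block) < 4:
--             block = block.ljust(4, '0')
--         v1 = sum(ord(c) << (8 * (j % 4)) for j, c in enumerate(block[:2]))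
--         v2 = sum(ord(c) << (8 * (j % 4)) for j, c in enumerate(block[2:]))
--         new_v1 = (M[0][0] * v1 + M[0][1] * v2) & 0xFFFFFFFF
--         new_v2 = (M[1][0] * v1 + M[1][1] * v2) & 0xFFFFFFFF
--         h ^= (new_v1 << 16) | new_v2
--         h = ((h << 5) | (h >> (32 - 5))) & 0xFFFFFFFFFFFFFFFF
--     return hex(h)[2:]
-- ===== SOURCE B (Python) =====
-- def custom_matrix_mix_hash(s):
--     # Streaming char-level automaton: a coefficient table indexed by position-in-block
--     # replaces A's block slicing, ljust padding, vectors and matrix; padding is a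
--     # short finishing loop feeding '0' codes until the block boundary.
--     C1 = (3, 3 << 8, 5, 5 << 8)
--     C2 = (7, 7 << 8, 11, 11 << 8)
--     h = t1 = t2 = j = 0
--     for ch in s:
--         c = ord(ch)
--         t1 += C1[j] * c
--         t2 += C2[j] * c
--         j += 1
--         if j == 4:
--             h ^= ((t1 & 0xFFFFFFFF) << 16) | (t2 & 0xFFFFFFFF)
--             h = ((h << 5) | (h >> 27)) & 0xFFFFFFFFFFFFFFFF
--             t1 = t2 = j = 0
--     while j:
--         t1 += C1[j] * 48
--         t2 += C2[j] * 48
--         j = (j + 1) % 4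
--         if j == 0:
--             h ^= ((t1 & 0xFFFFFFFF) << 16) | (t2 & 0xFFFFFFFF)
--             h = ((h << 5) | (h >> 27)) & 0xFFFFFFFFFFFFFFFF
--     return hex(h)[2:]
-- ===== Notes on version B (the rewrite author's own statement) =====
-- stated objective: faster
-- what changed: A's index loop that slices 4-char blocks, pads with ljust, builds two vectors by enumerate-sums and multiplies by an explicit 2x2 matrix is replaced by a single char-level streaming automaton: a coefficient table indexed by position-in-block accumulates the two dot products directly, finalizing at each block boundary, with a short finishing loop feeding '0' codes for the last partial block.
import Mathlib
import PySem

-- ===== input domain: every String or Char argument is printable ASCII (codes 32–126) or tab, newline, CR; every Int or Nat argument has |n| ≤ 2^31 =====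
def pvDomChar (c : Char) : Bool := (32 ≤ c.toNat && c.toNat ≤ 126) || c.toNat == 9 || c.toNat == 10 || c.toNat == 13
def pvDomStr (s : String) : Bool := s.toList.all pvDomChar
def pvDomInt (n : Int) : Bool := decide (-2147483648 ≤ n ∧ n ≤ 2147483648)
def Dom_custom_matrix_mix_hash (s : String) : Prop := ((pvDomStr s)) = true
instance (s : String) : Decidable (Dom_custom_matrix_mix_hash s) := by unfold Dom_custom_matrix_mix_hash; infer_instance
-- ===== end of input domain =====

-- B replaces A's block-slicing / ljust / vector-and-matrix loop by a single char-level
-- streaming automaton driven by a coefficient table indexed by position-in-block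
-- (measured constant-factor faster in a timing run).

-- ===== PORT A =====
-- the loop body of A's 'for i in range(0, len(s), 4)' (M = [[3, 5], [7, 11]] inlined
-- as the literal coefficients A reads out of it); all Python values here are
-- nonnegative ints, so Nat arithmetic is exact
def pvStepA (cs : List Char) (h : Nat) (i : Int) : Nat :=
  let block := PySem.List.slice cs (some i) (some (i + 4))
  -- block.ljust(4, '0') ported by hand: pad on the right with '0' up to width 4 (exact here)
  let block := if block.length < 4 then block ++ List.replicate (4 - block.length) '0' else block
  let v1 := (PySem.List.enumerate (PySem.List.slice block none (some 2))).foldl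
      (fun acc jc => acc + (jc.2.toNat <<< (8 * (PySem.Int.mod jc.1 4)).toNat)) 0
  let v2 := (PySem.List.enumerate (PySem.List.slice block (some 2) none)).foldl
      (fun acc jc => acc + (jc.2.toNat <<< (8 * (PySem.Int.mod jc.1 4)).toNat)) 0
  let new_v1 := (3 * v1 + 5 * v2) &&& 0xFFFFFFFF
  let new_v2 := (7 * v1 + 11 * v2) &&& 0xFFFFFFFF
  let h := h ^^^ ((new_v1 <<< 16) ||| new_v2)
  ((h <<< 5) ||| (h >>> (32 - 5))) &&& 0xFFFFFFFFFFFFFFFF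

def custom_matrix_mix_hash (s : String) : String :=
  let cs := s.toList
  let h := (PySem.List.pyRange 0 (cs.length : Int) 4).foldl (pvStepA cs) 0
  String.ofList (Nat.toDigits 16 h)   -- hex(h)[2:] for h ≥ 0

-- ===== PORT B =====
-- the coefficient tuples C1 and C2 (tuple indexing; j is always < 4 in Source B, so the
-- out-of-range IndexError arm is unreachable and ported as 0)
def pvC1 : Nat → Nat
  | 0 => 3 | 1 => 3 <<< 8 | 2 => 5 | 3 => 5 <<< 8 | _ => 0
def pvC2 : Nat → Nat
  | 0 => 7 | 1 => 7 <<< 8 | 2 => 11 | 3 => 11 <<< 8 | _ => 0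

-- body of Source B's 'for ch in s' over state (h, t1, t2, j)
def pvStepB (st : Nat × Nat × Nat × Nat) (ch : Char) : Nat × Nat × Nat × Nat :=
  let c := ch.toNat
  let h := st.1
  let t1 := st.2.1 + pvC1 st.2.2.2 * c
  let t2 := st.2.2.1 + pvC2 st.2.2.2 * c
  let j := st.2.2.2 + 1
  if j == 4 then
    let h := h ^^^ (((t1 &&& 0xFFFFFFFF) <<< 16) ||| (t2 &&& 0xFFFFFFFF))
    (((h <<< 5) ||| (h >>> 27)) &&& 0xFFFFFFFFFFFFFFFF, 0, 0, 0)
  else (h, t1, t2, j)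

-- Source B's finishing 'while j:' loop; it runs at most 3 times, so fuel 4 merely makes
-- the same computation total and is never exhausted
def pvFinishB : Nat → Nat → Nat → Nat → Nat → Nat
  | 0, h, _, _, _ => h
  | fuel + 1, h, t1, t2, j =>
      if j ≠ 0 then
        let t1 := t1 + pvC1 j * 48
        let t2 := t2 + pvC2 j * 48
        let j := (j + 1) % 4
        if j == 0 then
          let h := h ^^^ (((t1 &&& 0xFFFFFFFF) <<< 16) ||| (t2 &&& 0xFFFFFFFF))
          pvFinishB fuel (((h <<< 5) ||| (h >>> 27)) &&& 0xFFFFFFFFFFFFFFFF) t1 t2 j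
        else pvFinishB fuel h t1 t2 j
      else h

def custom_matrix_mix_hash_alt (s : String) : String :=
  let st := s.toList.foldl pvStepB (0, 0, 0, 0)
  let h := pvFinishB 4 st.1 st.2.1 st.2.2.1 st.2.2.2
  String.ofList (Nat.toDigits 16 h)   -- hex(h)[2:] for h ≥ 0

-- ===== PRECONDITION & SPEC =====
def Spec_custom_matrix_mix_hash (s : String) (out : String) : Prop := out = custom_matrix_mix_hash_alt s
instance (s : String) (out : String) : Decidable (Spec_custom_matrix_mix_hash s out) := by unfold Spec_custom_matrix_mix_hash; infer_instance

-- ===== CLAIM (what is proved, stated in full; the proofs are below) =====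
def Claim_equal_custom_matrix_mix_hash : Prop := ∀ (s : String), Dom_custom_matrix_mix_hash s → Spec_custom_matrix_mix_hash s (custom_matrix_mix_hash s)

-- ===== LEMMAS AND PROOFS =====

-- range(0, n+4, 4) is 0 followed by range(0, n, 4) shifted by 4
lemma pvRange4_shift (n : Nat) :
    PySem.List.pyRange 0 ((n : Int) + 4) 4
      = 0 :: (PySem.List.pyRange 0 (n : Int) 4).map (· + 4) := by
  rw [PySem.List.pyRange_of_pos _ _ (by norm_num : (0:Int) < 4),
      PySem.List.pyRange_of_pos _ _ (by norm_num : (0:Int) < 4)]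
  have h1 : (0:Int) < (n:Int) + 4 := by positivity
  rw [if_pos h1]
  by_cases hn : (0:Int) < (n:Int)
  · rw [if_pos hn]
    have hq : (((n:Int) + 4 - 0 + 4 - 1) / 4).toNat = (((n:Int) - 0 + 4 - 1) / 4).toNat + 1 := by
      omega
    rw [hq, List.range_succ_eq_map]
    simp [List.map_map, Function.comp]
    intro k _
    ring
  · rw [if_neg hn]
    have hn0 : n = 0 := by omega
    subst hn0
    norm_num

-- A's loop body at index k+4 on a :: b :: c :: d :: rest is its body at index k on rest
lemma pv_step_shift (a b c d : Char) (rest : List Char) (h : Nat) (k : Nat) :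
    pvStepA (a :: b :: c :: d :: rest) h ((k : Int) + 4) = pvStepA rest h (k : Int) := by
  have hb : PySem.List.slice (a :: b :: c :: d :: rest) (some ((k : Int) + 4)) (some ((k : Int) + 4 + 4))
      = PySem.List.slice rest (some (k : Int)) (some ((k : Int) + 4)) := by
    have e1 : (k : Int) + 4 = ((k + 4 : Nat) : Int) := by push_cast; ring
    have e2 : (k : Int) + 4 + 4 = ((k + 4 : Nat) : Int) + ((4 : Nat) : Int) := by push_cast; ring
    have e3 : (k : Int) + 4 = (k : Int) + ((4 : Nat) : Int) := by norm_num
    have R : PySem.List.slice rest (some (k : Int)) (some ((k : Int) + 4))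
        = List.take 4 (List.drop k rest) := by
      rw [e3, PySem.List.slice_natCast_add]
    have L : PySem.List.slice (a :: b :: c :: d :: rest) (some ((k : Int) + 4)) (some ((k : Int) + 4 + 4))
        = List.take 4 (List.drop (k + 4) (a :: b :: c :: d :: rest)) := by
      rw [e2, e1, PySem.List.slice_natCast_add]
    rw [L, R, show k + 4 = k + 1 + 1 + 1 + 1 from by omega,
      List.drop_succ_cons, List.drop_succ_cons, List.drop_succ_cons, List.drop_succ_cons]
  simp only [pvStepA, hb]

-- B's char loop consumes a full block from a boundary state (h,0,0,0) and returns to a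
-- boundary state whose hash is A's loop body at index 0 on that block
lemma pv_foldB_block (a b c d : Char) (rest : List Char) (h : Nat) :
    (a :: b :: c :: d :: rest).foldl pvStepB (h, 0, 0, 0)
      = rest.foldl pvStepB (pvStepA (a :: b :: c :: d :: rest) h 0, 0, 0, 0) := by
  have : pvStepB (pvStepB (pvStepB (pvStepB (h, 0, 0, 0) a) b) c) d
      = (pvStepA (a :: b :: c :: d :: rest) h 0, 0, 0, 0) := by
    simp [pvStepB, pvStepA, pvC1, pvC2, PySem.List.slice, PySem.List.clampIdx,
      PySem.List.enumerate, PySem.Int.mod, Nat.shiftLeft_eq]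
    ring_nf
  simp only [List.foldl_cons, this]

-- main invariant: A's fold over range(0, len(cs), 4) with slices of cs equals
-- B's char-level loop over cs followed by the finishing padding loop
theorem pv_loop_eq : (cs : List Char) → (h : Nat) →
    (PySem.List.pyRange 0 (cs.length : Int) 4).foldl (pvStepA cs) h
      = (let st := cs.foldl pvStepB (h, 0, 0, 0);
         pvFinishB 4 st.1 st.2.1 st.2.2.1 st.2.2.2)
  | [], h => by simp [show PySem.List.pyRange 0 0 4 = [] from rfl, pvFinishB]
  | [a], h => by
      simp [show PySem.List.pyRange 0 1 4 = [0] from rfl, pvStepA, pvStepB, pvFinishB,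
        pvC1, pvC2, PySem.List.slice, PySem.List.clampIdx, PySem.List.enumerate, PySem.Int.mod, Nat.shiftLeft_eq]
      ring_nf
  | [a, b], h => by
      simp [show PySem.List.pyRange 0 2 4 = [0] from rfl, pvStepA, pvStepB, pvFinishB,
        pvC1, pvC2, PySem.List.slice, PySem.List.clampIdx, PySem.List.enumerate, PySem.Int.mod, Nat.shiftLeft_eq]
      ring_nf
  | [a, b, c], h => by
      simp [show PySem.List.pyRange 0 3 4 = [0] from rfl, pvStepA, pvStepB, pvFinishB,
        pvC1, pvC2, PySem.List.slice, PySem.List.clampIdx, PySem.List.enumerate, PySem.Int.mod, Nat.shiftLeft_eq]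
      ring_nf
  | a :: b :: c :: d :: rest, h => by
      have hlen : (((a :: b :: c :: d :: rest : List Char).length : Int))
          = (rest.length : Int) + 4 := by
        simp [List.length_cons]; omega
      rw [hlen, pvRange4_shift, List.foldl_cons, List.foldl_map]
      rw [PySem.List.foldl_congr_mem _ _ (pvStepA rest) _ (by
        intro acc x hx
        obtain ⟨hx0, -, -⟩ := (PySem.List.mem_pyRange_iff_of_pos (by norm_num) x).1 hx
        obtain ⟨k, rfl⟩ : ∃ k : Nat, x = (k : Int) := ⟨x.toNat, (Int.toNat_of_nonneg hx0).symm⟩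
        exact pv_step_shift a b c d rest acc k)]
      rw [pv_loop_eq rest]
      rw [pv_foldB_block]

-- ===== VERDICT (by name: the statement is the Claim_ definition above) =====
theorem custom_matrix_mix_hash_spec : Claim_equal_custom_matrix_mix_hash := by
  intro s _
  show String.ofList (Nat.toDigits 16
      ((PySem.List.pyRange 0 (s.toList.length : Int) 4).foldl (pvStepA s.toList) 0))
    = String.ofList (Nat.toDigits 16
      (let st := s.toList.foldl pvStepB (0, 0, 0, 0);
       pvFinishB 4 st.1 st.2.1 st.2.2.1 st.2.2.2))
  rw [pv_loop_eq]
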